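-- pv_equiv track=rewrite | github.com/inz1981/AoC | 2015/08/08.py | part_2
-- ===== SOURCE A (Python) =====
-- def part_2(data):
--     string_total = 0
--     total = 0
--     for string in data:
--         total += len(string)
--         string = string.replace("\\", "\\\\")
--         string = string.replace('"', '\\"')
--         string = '"' + string + '"'
--         string_total += len(string)
--     return string_total-total
-- ===== SOURCE B (Python) =====
-- def part_2(data):
--     # Each string costs exactly 2 quotes plus one extra char per backslash or quote.
--     return sum(2 + s.count('\\') + s.count('"') for s in data)
-- ===== Notes on version B (the rewrite author's own statement) =====
-- stated objective: simpler
-- what changed: B never builds the encoded string: it sums 2 + count('\') + count('"') per string in one pass, instead of A's two replace passes, quote concatenation and length subtraction.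
import Mathlib
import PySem

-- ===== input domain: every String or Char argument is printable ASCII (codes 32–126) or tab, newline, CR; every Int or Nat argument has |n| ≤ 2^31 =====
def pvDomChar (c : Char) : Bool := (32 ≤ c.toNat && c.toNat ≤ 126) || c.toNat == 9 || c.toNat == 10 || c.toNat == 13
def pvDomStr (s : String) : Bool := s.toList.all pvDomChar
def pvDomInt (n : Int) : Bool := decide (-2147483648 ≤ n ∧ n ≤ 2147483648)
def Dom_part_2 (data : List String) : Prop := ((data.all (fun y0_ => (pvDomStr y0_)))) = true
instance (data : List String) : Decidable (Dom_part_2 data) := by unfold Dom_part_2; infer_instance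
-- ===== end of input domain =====

-- B replaces A's encode-then-subtract (two replaces, quote concatenation, two running
-- length totals) by a direct per-string count 2 + count('\') + count('"'), summed.

-- ===== PORT A =====
def part_2 (data : List String) : Int :=
  let st := data.foldl (fun (st : Int × Int) string =>
    let total := st.2 + PySem.Str.len string
    let string := PySem.Str.replace string "\\" "\\\\"
    let string := PySem.Str.replace string "\"" "\\\""
    -- '"' + string + '"' : string concatenation, ported exactly on code points
    let string := String.ofList ('"' :: string.toList ++ ['"'])
    (st.1 + PySem.Str.len string, total)) (0, 0)
  st.1 - st.2

-- ===== PORT B =====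
def part_2_alt (data : List String) : Int :=
  (data.map (fun s =>
    2 + (PySem.Str.count s "\\" : Int) + (PySem.Str.count s "\"" : Int))).sum

-- ===== PRECONDITION & SPEC =====
def Spec_part_2 (data : List String) (out : Int) : Prop := out = part_2_alt data
instance (data : List String) (out : Int) : Decidable (Spec_part_2 data out) := by unfold Spec_part_2; infer_instance

-- ===== CLAIM (what is proved, stated in full; the proofs are below) =====
def Claim_equal_part_2 : Prop := ∀ (data : List String), Dom_part_2 data → Spec_part_2 data (part_2 data)

-- ===== LEMMAS AND PROOFS =====

-- single-character replace is a flatMap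
theorem replace_go_single (a : Char) (new : List Char) :
    ∀ (l : List Char) (fuel : Nat) (acc : List Char), l.length ≤ fuel →
      PySem.Chars.replace.go [a] new fuel l acc =
        acc.reverse ++ l.flatMap (fun c => if c = a then new else [c]) := by
  intro l
  induction l with
  | nil =>
      intro fuel acc _
      cases fuel <;> simp [PySem.Chars.replace.go]
  | cons c t ih =>
      intro fuel acc h
      cases fuel with
      | zero => simp at h
      | succ fuel =>
        simp only [PySem.Chars.replace.go]
        have ht : t.length ≤ fuel := by simp at h; omega
        by_cases hc : c = a
        · subst hc
          rw [if_pos (by simp [List.isPrefixOf])]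
          simp only [List.length_cons, List.length_nil, List.drop_succ_cons, List.drop_zero]
          rw [ih fuel (new.reverse ++ acc) ht]
          simp
        · rw [if_neg (by simp [List.isPrefixOf, Ne.symm hc])]
          rw [ih fuel (c :: acc) ht]
          simp [hc]

theorem replace_single (a : Char) (new l : List Char) :
    PySem.Chars.replace l [a] new = l.flatMap (fun c => if c = a then new else [c]) := by
  simp only [PySem.Chars.replace, List.isEmpty]
  rw [if_neg (by simp)]
  simpa using replace_go_single a new l l.length [] (le_refl _)

-- single-character count is List.count
theorem count_go_single (a : Char) :
    ∀ (l : List Char) (fuel : Nat) (acc : Nat), l.length ≤ fuel →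
      PySem.Chars.count.go [a] fuel l acc = acc + l.count a := by
  intro l
  induction l with
  | nil =>
      intro fuel acc _
      cases fuel <;> simp [PySem.Chars.count.go]
  | cons c t ih =>
      intro fuel acc h
      cases fuel with
      | zero => simp at h
      | succ fuel =>
        simp only [PySem.Chars.count.go]
        have ht : t.length ≤ fuel := by simp at h; omega
        by_cases hc : c = a
        · subst hc
          rw [if_pos (by simp [List.isPrefixOf])]
          simp only [List.length_cons, List.length_nil, List.drop_succ_cons, List.drop_zero]
          rw [ih fuel (acc + 1) ht]
          simp [List.count_cons]
          omega
        · rw [if_neg (by simp [List.isPrefixOf, Ne.symm hc])]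
          rw [ih fuel acc ht]
          simp [List.count_cons, hc]

theorem count_single (a : Char) (l : List Char) :
    PySem.Chars.count l [a] = l.count a := by
  simp only [PySem.Chars.count, List.isEmpty]
  rw [if_neg (by simp)]
  simpa using count_go_single a l l.length 0 (le_refl _)

-- length of the single-char-replace flatMap with a 2-char replacement
theorem length_flatMap_two (a b₁ b₂ : Char) (l : List Char) :
    (l.flatMap (fun c => if c = a then [b₁, b₂] else [c])).length
      = l.length + l.count a := by
  induction l with
  | nil => simp
  | cons c t ih =>
      by_cases hc : c = a
      · subst hc; simp [List.count_cons, ih]; omega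
      · simp only [List.flatMap_cons, if_neg hc, List.length_append, ih,
          List.length_cons, List.count_cons, if_neg hc]
        simp [hc]
        omega

-- counting b through the flatMap when b is not produced by the replacement
theorem count_flatMap_two (a b₁ b₂ b : Char) (hb : b ≠ a) (h1 : b ≠ b₁) (h2 : b ≠ b₂)
    (l : List Char) :
    (l.flatMap (fun c => if c = a then [b₁, b₂] else [c])).count b = l.count b := by
  induction l with
  | nil => simp
  | cons c t ih =>
      by_cases hc : c = a
      · subst hc
        simp [List.count_cons, ih, Ne.symm h1, Ne.symm h2, hb, Ne.symm hb]
      · simp [hc, List.count_cons, ih]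

-- the body of A's loop, named for the proofs (definitionally A's fold function)
def stepA : Int × Int → String → Int × Int := fun st string =>
  let total := st.2 + PySem.Str.len string
  let string := PySem.Str.replace string "\\" "\\\\"
  let string := PySem.Str.replace string "\"" "\\\""
  let string := String.ofList ('"' :: string.toList ++ ['"'])
  (st.1 + PySem.Str.len string, total)

-- one step of A's loop, expressed through B's per-string cost
theorem step_eq (st : Int × Int) (s : String) :
    stepA st s
    = (st.1 + PySem.Str.len s
         + (2 + (PySem.Str.count s "\\" : Int) + (PySem.Str.count s "\"" : Int)),
       st.2 + PySem.Str.len s) := by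
  have hbs : ("\\" : String).toList = ['\\'] := by decide
  have hbs2 : ("\\\\" : String).toList = ['\\', '\\'] := by decide
  have hq : ("\"" : String).toList = ['"'] := by decide
  have hbq : ("\\\"" : String).toList = ['\\', '"'] := by decide
  simp only [stepA, PySem.Str.len_eq, PySem.Str.toList_replace, PySem.Str.count_eq,
    String.toList_ofList, hbs, hbs2, hq, hbq, replace_single, count_single]
  have h1 := length_flatMap_two '\\' '\\' '\\' s.toList
  have h2 := length_flatMap_two '"' '\\' '"'
      (s.toList.flatMap (fun c => if c = '\\' then ['\\', '\\'] else [c]))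
  have h3 := count_flatMap_two '\\' '\\' '\\' '"' (by decide) (by decide) (by decide) s.toList
  simp only [List.length_cons, List.length_append, h2, h1, h3, List.length_cons]
  push_cast
  simp
  ring_nf

-- the fold's difference of totals is B's sum
theorem fold_diff (data : List String) : ∀ (st : Int × Int),
    (data.foldl stepA st).1 - (data.foldl stepA st).2 = st.1 - st.2 + part_2_alt data := by
  induction data with
  | nil => intro st; simp [part_2_alt]
  | cons s t ih =>
      intro st
      simp only [List.foldl_cons, step_eq]
      rw [ih]
      simp [part_2_alt]
      ring

theorem part_2_eq_stepA (data : List String) :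
    part_2 data = (data.foldl stepA (0, 0)).1 - (data.foldl stepA (0, 0)).2 := rfl

-- ===== VERDICT (by name: the statement is the Claim_ definition above) =====
theorem part_2_spec : Claim_equal_part_2 := by
  intro data _
  unfold Spec_part_2
  rw [part_2_eq_stepA]
  simpa using fold_diff data (0, 0)
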